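-- pv_equiv track=rewrite | github.com/vlopezferrando/advent-of-code | 20.py | fill_monster
-- ===== SOURCE A (Python) =====
-- def fill_monster(r):
--     monster = ["                  # ", "#    ##    ##    ###", " #  #  #  #  #  #   "]
--     for i in range(len(r) - len(monster)):
--         for j in range(len(r[0]) - len(monster[0])):
--             valid = True
--             for mi, mrow in enumerate(monster):
--                 for mj, mc in enumerate(mrow):
--                     if mc == "#" and r[i + mi][j + mj] == ".":
--                         valid = False
--             if valid:
--                 for mi, mrow in enumerate(monster):
--                     for mj, mc in enumerate(mrow):
--                         if mc == "#":
--                             l = list(r[i + mi])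
--                             l[j + mj] = "O"
--                             r[i + mi] = "".join(l)
--     return r
-- ===== SOURCE B (Python) =====
-- def fill_monster(r):
--     monster = ["                  # ", "#    ##    ##    ###", " #  #  #  #  #  #   "]
--     H, W = len(monster), len(monster[0])
--     if len(r) > H and len(r[0]) > W:
--         # each monster row and each grid row becomes one integer bitmask
--         mmasks = [sum(1 << k for k, c in enumerate(row) if c == "#") for row in monster]
--         rowmasks = [sum(1 << k for k, c in enumerate(row) if c != ".") for row in r]
--         omask = [0] * len(r)
--         for i in range(len(r) - H):
--             for j in range(len(r[0]) - W):
--                 if all((rowmasks[i + mi] >> j) & m == m for mi, m in enumerate(mmasks)):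
--                     for mi, m in enumerate(mmasks):
--                         omask[i + mi] |= m << j
--         return ["".join("O" if (omask[k] >> x) & 1 else c for x, c in enumerate(row))
--                 for k, row in enumerate(r)]
--     return r
-- ===== Notes on version B (the rewrite author's own statement) =====
-- stated objective: faster
-- what changed: Bitmask algorithm: every monster row and every grid row is packed once into an integer bitmask of its non-'.' (resp. '#') cells, each anchor is tested with one shift-and-AND per monster row instead of scanning 20 characters, matches accumulate into per-row 'O' bitmasks, and the output is rendered in a single final pass; correct because marking writes 'O' only over non-'.' cells, so the non-'.' masks are invariant under A's in-place marking. Equivalence is about the return value only: A mutates its argument list in place, B does not.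
import Mathlib
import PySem

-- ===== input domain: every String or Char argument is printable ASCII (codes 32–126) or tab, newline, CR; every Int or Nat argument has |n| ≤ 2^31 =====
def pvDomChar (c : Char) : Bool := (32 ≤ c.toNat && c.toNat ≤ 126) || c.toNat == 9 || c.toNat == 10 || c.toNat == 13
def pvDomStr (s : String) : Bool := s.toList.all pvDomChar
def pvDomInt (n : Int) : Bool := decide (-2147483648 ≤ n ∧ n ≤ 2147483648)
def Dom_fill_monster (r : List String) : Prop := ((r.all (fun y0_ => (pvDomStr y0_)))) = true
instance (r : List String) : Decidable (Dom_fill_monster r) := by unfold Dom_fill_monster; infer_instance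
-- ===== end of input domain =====

-- B replaces A's per-cell quadruple loop by a bitmask algorithm (each row packed once into an
-- integer mask, one shift-and-AND per monster row per anchor, marks accumulated in per-row 'O'
-- masks, output rendered in one final pass); return values agree; A additionally mutates its
-- argument list in place, B does not.

-- ===== PORT A =====
def pvMonster : List String := ["                  # ", "#    ##    ##    ###", " #  #  #  #  #  #   "]

-- r[a][b] as a Char; the defaults are unreachable under Pre_ (Python raises there)
def pvCell (s : List String) (a b : Nat) : Char := (s.getD a "").toList.getD b ' '

-- A's `valid` flag for an anchor (i, j)
def pvValidA (s : List String) (i j : Nat) : Bool :=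
  pvMonster.zipIdx.foldl (fun v p =>
    p.1.toList.zipIdx.foldl (fun v q =>
      if q.1 = '#' ∧ pvCell s (i + p.2) (j + q.2) = '.' then false else v) v) true

-- A's marking loop for a valid anchor (i, j): r[i+mi] = "".join(l) with l[j+mj] = "O"
def pvMarkA (s : List String) (i j : Nat) : List String :=
  pvMonster.zipIdx.foldl (fun s p =>
    p.1.toList.zipIdx.foldl (fun s q =>
      if q.1 = '#' then
        s.set (i + p.2) (String.ofList ((s.getD (i + p.2) "").toList.set (j + q.2) 'O'))
      else s) s) s

def fill_monster (r : List String) : List String :=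
  (List.range (r.length - pvMonster.length)).foldl (fun s i =>
    (List.range ((s.getD 0 "").toList.length - (pvMonster.getD 0 "").toList.length)).foldl (fun s j =>
      if pvValidA s i j then pvMarkA s i j else s) s) r

-- ===== PORT B =====
-- sum(1 << k for k, c in enumerate(row) if p(c)): a row as an integer bitmask
def pvMaskOf (p : Char → Bool) (l : List Char) : Nat :=
  ((l.zipIdx).map (fun q => if p q.1 then 2 ^ q.2 else 0)).sum

-- mmasks: one bitmask per monster row
def pvMM : List Nat := pvMonster.map (fun s => pvMaskOf (fun c => c == '#') s.toList)

-- rowmasks: the non-'.' cells of each grid row as a bitmask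
def pvRM (r : List String) : List Nat := r.map (fun s => pvMaskOf (fun c => c != '.') s.toList)

-- all((rowmasks[i+mi] >> j) & m == m for mi, m in enumerate(mmasks))
def pvBChk (rm : List Nat) (i j : Nat) : Bool :=
  pvMM.zipIdx.all (fun q => ((rm.getD (i + q.2) 0) >>> j) &&& q.1 == q.1)

-- for mi, m in enumerate(mmasks): omask[i+mi] |= m << j
def pvBWrite (om : List Nat) (i j : Nat) : List Nat :=
  pvMM.zipIdx.foldl (fun om q => om.set (i + q.2) ((om.getD (i + q.2) 0) ||| (q.1 <<< j))) om

def fill_monster_alt (r : List String) : List String :=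
  if pvMonster.length < r.length ∧ (pvMonster.getD 0 "").toList.length < (r.getD 0 "").toList.length then
  let rm := pvRM r
  let om := (List.range (r.length - pvMonster.length)).foldl (fun om i =>
      (List.range ((r.getD 0 "").toList.length - (pvMonster.getD 0 "").toList.length)).foldl
        (fun om j => if pvBChk rm i j then pvBWrite om i j else om) om)
    (List.replicate r.length 0)
  r.zipIdx.map (fun p => String.ofList (p.1.toList.zipIdx.map (fun q =>
    if ((om.getD p.2 0) >>> q.2) &&& 1 == 1 then 'O' else q.1)))
  else r

-- ===== PRECONDITION & SPEC =====
-- the '#' cells of the monster, as (row, column) offsets (used by Pre_ and the proofs)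
def pvOffsets : List (Nat × Nat) :=
  pvMonster.zipIdx.flatMap (fun p =>
    p.1.toList.zipIdx.filterMap (fun q => if q.1 = '#' then some (p.2, q.2) else none))

-- Pre_ excludes exactly the inputs on which the Python A raises IndexError reading r[i+mi][j+mj]:
-- grids with a scanned row too short for some '#' cell of the monster at some scanned anchor.
def Pre_fill_monster (r : List String) : Prop :=
  ∀ i < r.length - pvMonster.length, ∀ j < (r.getD 0 "").toList.length - 20,
    ∀ q ∈ pvOffsets, j + q.2 < (r.getD (i + q.1) "").toList.length
instance (r : List String) : Decidable (Pre_fill_monster r) := by unfold Pre_fill_monster; infer_instance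

def pvWitness_fill_monster : List String :=
  ["....................#", ".#....##....##....###", "..#..#..#..#..#..#...", "....................."]

def Spec_fill_monster (r : List String) (out : List String) : Prop := out = fill_monster_alt r
instance (r : List String) (out : List String) : Decidable (Spec_fill_monster r out) := by unfold Spec_fill_monster; infer_instance

-- ===== CLAIM (what is proved, stated in full; the proofs are below) =====
def Claim_equal_fill_monster : Prop := ∀ (r : List String), Dom_fill_monster r → Pre_fill_monster r → Spec_fill_monster r (fill_monster r)

-- ===== LEMMAS AND PROOFS =====

-- B's match test on the untouched grid, character level (bridge between the two ports)
def pvChk (r : List String) (i j : Nat) : Bool :=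
  pvOffsets.all (fun m => pvCell r (i + m.1) (j + m.2) ≠ '.')

-- single 'O'-write, string level
def pvWS (s : List String) (p : Nat × Nat) : List String :=
  s.set p.1 (String.ofList ((s.getD p.1 "").toList.set p.2 'O'))

def pvShift (i j : Nat) : List (Nat × Nat) := pvOffsets.map (fun q => (i + q.1, j + q.2))

-- every position in ps is a non-'.' cell of r
def pvGood (r : List String) (ps : List (Nat × Nat)) : Prop := ∀ p ∈ ps, pvCell r p.1 p.2 ≠ '.'

-- the full write sequence A performs
def pvMarks (r : List String) (is : List Nat) : List (Nat × Nat) :=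
  is.flatMap (fun i =>
    (List.range ((r.getD 0 "").toList.length - (pvMonster.getD 0 "").toList.length)).flatMap
      (fun j => if pvChk r i j then pvShift i j else []))

lemma pv_getD_set {α : Type} (l : List α) (n i : Nat) (x d : α) :
    (l.set n x).getD i d = if n = i ∧ n < l.length then x else l.getD i d := by
  simp only [List.getD, List.getElem?_set]
  split_ifs
  all_goals simp_all
  all_goals omega

lemma pv_len_WS (s : List String) (p : Nat × Nat) : (pvWS s p).length = s.length := by
  simp [pvWS]

lemma pv_rowlen_WS (s : List String) (p : Nat × Nat) (a : Nat) :
    ((pvWS s p).getD a "").toList.length = ((s.getD a "").toList.length) := by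
  simp only [pvWS, pv_getD_set]
  split_ifs with h
  · rw [← h.1]; simp [String.toList_ofList]
  · rfl

-- writing 'O' over a non-'.' cell preserves which cells read '.'
lemma pv_cell_WS (s : List String) (p : Nat × Nat) (h : pvCell s p.1 p.2 ≠ '.') (a b : Nat) :
    (pvCell (pvWS s p) a b = '.') ↔ (pvCell s a b = '.') := by
  simp only [pvCell, pvWS, pv_getD_set]
  split_ifs with h1
  · rw [← h1.1]
    simp only [String.toList_ofList, pv_getD_set]
    split_ifs with h2
    · constructor <;> intro hc
      · exact absurd hc (by decide)
      · exact absurd (h2.1 ▸ hc) (by simpa [pvCell, ← h1.1] using h)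
    · rfl
  · rfl

lemma pv_all_congr {α : Type} (l : List α) (p q : α → Bool) (h : ∀ x ∈ l, p x = q x) :
    l.all p = l.all q := by
  induction l with
  | nil => rfl
  | cons a t ih => simp_all

-- batched-write invariants: length, row lengths and the '.'-cells are preserved
lemma pv_WL (r : List String) (ps : List (Nat × Nat)) (h : pvGood r ps) :
    (ps.foldl pvWS r).length = r.length ∧
    (∀ a, ((ps.foldl pvWS r).getD a "").toList.length = (r.getD a "").toList.length) ∧
    (∀ a b, (pvCell (ps.foldl pvWS r) a b = '.') ↔ (pvCell r a b = '.')) := by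
  induction ps using List.reverseRecOn with
  | nil => exact ⟨rfl, fun _ => rfl, fun _ _ => Iff.rfl⟩
  | append_singleton t p ih =>
    have hg : pvGood r t := fun q hq => h q (List.mem_append_left _ hq)
    have hp : pvCell r p.1 p.2 ≠ '.' := h p (List.mem_append_right _ (List.mem_singleton_self p))
    obtain ⟨ih1, ih2, ih3⟩ := ih hg
    have hp' : pvCell (t.foldl pvWS r) p.1 p.2 ≠ '.' := fun hc => hp ((ih3 _ _).mp hc)
    rw [List.foldl_append]
    refine ⟨by rw [List.foldl_cons, List.foldl_nil, pv_len_WS, ih1], fun a => ?_, fun a b => ?_⟩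
    · rw [List.foldl_cons, List.foldl_nil, pv_rowlen_WS, ih2]
    · rw [List.foldl_cons, List.foldl_nil, pv_cell_WS _ _ hp', ih3]

-- the match test is unchanged by any good batch of writes
lemma pv_chk_inv (r : List String) (ps : List (Nat × Nat)) (h : pvGood r ps) (i j : Nat) :
    pvChk (ps.foldl pvWS r) i j = pvChk r i j := by
  unfold pvChk
  refine pv_all_congr _ _ _ (fun m _ => ?_)
  have := (pv_WL r ps h).2.2 (i + m.1) (j + m.2)
  by_cases hc : pvCell r (i + m.1) (j + m.2) = '.'
  · simp [hc, this.mpr hc]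
  · simp [hc]; exact fun hcc => hc (this.mp hcc)

-- generic fold shapes
lemma pv_foldl_if_false {α : Type} (p : α → Prop) [DecidablePred p] (l : List α) (v : Bool) :
    l.foldl (fun v x => if p x then false else v) v = (v && l.all (fun x => !(decide (p x)))) := by
  induction l generalizing v with
  | nil => simp
  | cons a t ih =>
    rw [List.foldl_cons, ih]
    by_cases h : p a <;> simp [h]

lemma pv_foldl_and {α : Type} (q : α → Bool) (l : List α) (v : Bool) :
    l.foldl (fun v x => v && q x) v = (v && l.all q) := by
  induction l generalizing v with
  | nil => simp
  | cons a t ih => simp [ih, Bool.and_assoc]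

lemma pv_foldl_if_filterMap {α β γ : Type} (p : α → Prop) [DecidablePred p] (g : α → β)
    (f : γ → β → γ) (l : List α) (s : γ) :
    l.foldl (fun s x => if p x then f s (g x) else s) s
      = (l.filterMap (fun x => if p x then some (g x) else none)).foldl f s := by
  induction l generalizing s with
  | nil => rfl
  | cons a t ih => by_cases h : p a <;> simp [h, ih]

lemma pv_foldl_flatMap {α β γ : Type} (l : List α) (f : α → List β) (g : γ → β → γ) (s : γ) :
    (l.flatMap f).foldl g s = l.foldl (fun a x => (f x).foldl g a) s := by
  induction l generalizing s with
  | nil => rfl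
  | cons a t ih => simp [List.foldl_append, ih]

lemma pv_filterMap_if_flatMap {α β γ : Type} (p : α → Prop) [DecidablePred p] (g : α → β)
    (f : β → List γ) (l : List α) :
    (l.filterMap (fun x => if p x then some (g x) else none)).flatMap f
      = l.flatMap (fun x => if p x then f (g x) else []) := by
  induction l with
  | nil => rfl
  | cons a t ih => by_cases h : p a <;> simp [h, ih]

-- A's valid test is the offset test
lemma pv_validA_eq_chk (s : List String) (i j : Nat) : pvValidA s i j = pvChk s i j := by
  unfold pvValidA pvChk pvOffsets
  rw [List.all_flatMap]
  simp only [pv_foldl_if_false, pv_foldl_and, Bool.true_and, List.all_filterMap]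
  congr 1
  funext p
  congr 1
  funext q
  by_cases h1 : q.1 = '#' <;> by_cases h2 : pvCell s (i + p.2) (j + q.2) = '.' <;>
    simp [h1, h2]

-- A's marking loop is the batched write of the shifted offsets
lemma pv_markA_eq (s : List String) (i j : Nat) :
    pvMarkA s i j = (pvShift i j).foldl pvWS s := by
  unfold pvMarkA pvShift pvOffsets
  rw [List.map_flatMap, pv_foldl_flatMap]
  congr 1
  funext s' p
  have hbody : (fun (t : List String) (q : Char × Nat) =>
      if q.1 = '#' then t.set (i + p.2) (String.ofList ((t.getD (i + p.2) "").toList.set (j + q.2) 'O')) else t)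
    = fun t q => if q.1 = '#' then pvWS t (i + p.2, j + q.2) else t := by
    funext t q; by_cases h : q.1 = '#' <;> simp [h, pvWS]
  rw [hbody, pv_foldl_if_filterMap (fun (q : Char × Nat) => q.1 = '#')
    (fun q => (i + p.2, j + q.2)) pvWS, List.map_filterMap]
  congr 1
  · congr 1
    funext q
    by_cases h : q.1 = '#' <;> simp [h]

lemma pv_good_shift (r : List String) (i j : Nat) (h : pvChk r i j = true) :
    pvGood r (pvShift i j) := by
  intro p hp
  rcases List.mem_map.mp hp with ⟨q, hq, rfl⟩
  have := List.all_eq_true.mp h q hq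
  simpa using this

-- main induction, inner loop: checks on the evolving state are checks on r
lemma pv_inner (r : List String) (i : Nat) (js : List Nat) (ps : List (Nat × Nat)) (h : pvGood r ps) :
    js.foldl (fun s j => if pvChk s i j then (pvShift i j).foldl pvWS s else s) (ps.foldl pvWS r)
      = (ps ++ js.flatMap (fun j => if pvChk r i j then pvShift i j else [])).foldl pvWS r
    ∧ pvGood r (ps ++ js.flatMap (fun j => if pvChk r i j then pvShift i j else [])) := by
  induction js generalizing ps with
  | nil => exact ⟨by simp, by simpa using h⟩
  | cons j js ih =>
    rw [List.foldl_cons, pv_chk_inv r ps h i j]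
    by_cases hc : pvChk r i j = true
    · have hg : pvGood r (ps ++ pvShift i j) := by
        intro p hp
        rcases List.mem_append.mp hp with hp | hp
        · exact h p hp
        · exact pv_good_shift r i j hc p hp
      have := ih (ps ++ pvShift i j) hg
      rw [hc, if_pos rfl, ← List.foldl_append]
      simpa [hc, List.append_assoc] using this
    · have hc' : pvChk r i j = false := by simpa using hc
      rw [hc', if_neg (by simp)]
      have := ih ps h
      simpa [hc'] using this

-- main induction, outer loop
lemma pv_outer (r : List String) (is : List Nat) (ps : List (Nat × Nat)) (h : pvGood r ps) :
    is.foldl (fun s i =>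
        (List.range ((s.getD 0 "").toList.length - (pvMonster.getD 0 "").toList.length)).foldl
          (fun s j => if pvChk s i j then (pvShift i j).foldl pvWS s else s) s)
      (ps.foldl pvWS r)
      = (ps ++ pvMarks r is).foldl pvWS r
    ∧ pvGood r (ps ++ pvMarks r is) := by
  induction is generalizing ps with
  | nil => exact ⟨by simp [pvMarks], by simpa [pvMarks] using h⟩
  | cons i is ih =>
    rw [List.foldl_cons]
    have hrow : ((ps.foldl pvWS r).getD 0 "").toList.length = (r.getD 0 "").toList.length :=
      (pv_WL r ps h).2.1 0
    rw [hrow]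
    have hin := pv_inner r i (List.range ((r.getD 0 "").toList.length - (pvMonster.getD 0 "").toList.length)) ps h
    rw [hin.1]
    have := ih _ hin.2
    simpa [pvMarks, List.append_assoc] using this

-- A is the batched write sequence applied to r
lemma pv_A_marks (r : List String) :
    fill_monster r = (pvMarks r (List.range (r.length - pvMonster.length))).foldl pvWS r := by
  unfold fill_monster
  simp only [pv_validA_eq_chk, pv_markA_eq]
  have := pv_outer r (List.range (r.length - pvMonster.length)) [] (by intro p hp; simp at hp)
  simpa using this.1

-- ===================== B-side lemmas (bitmasks) =====================

lemma pv_mask_shift (p : Char → Bool) (l : List Char) (n : Nat) :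
    ((l.zipIdx (n+1)).map (fun q => if p q.1 then 2 ^ q.2 else 0)).sum
      = 2 * ((l.zipIdx n).map (fun q => if p q.1 then 2 ^ q.2 else 0)).sum := by
  induction l generalizing n with
  | nil => simp
  | cons c t ih =>
    simp only [List.zipIdx_cons, List.map_cons, List.sum_cons, ih (n+1), Nat.mul_add]
    by_cases h : p c <;> simp [h, pow_succ] <;> ring

lemma pv_mask_cons (p : Char → Bool) (c : Char) (t : List Char) :
    pvMaskOf p (c :: t) = (if p c then 1 else 0) + 2 * pvMaskOf p t := by
  unfold pvMaskOf
  rw [List.zipIdx_cons, List.map_cons, List.sum_cons, pv_mask_shift]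
  simp

lemma pv_mask_testBit (p : Char → Bool) (l : List Char) (k : Nat) :
    (pvMaskOf p l).testBit k = (decide (k < l.length) && p (l.getD k ' ')) := by
  induction l generalizing k with
  | nil => simp [pvMaskOf]
  | cons c t ih =>
    cases k with
    | zero =>
      rw [pv_mask_cons, Nat.testBit_zero]
      by_cases h : p c <;> simp [h, Nat.add_mul_mod_self_left] <;> omega
    | succ k =>
      rw [pv_mask_cons, Nat.testBit_succ]
      have hdiv : ((if p c then 1 else 0) + 2 * pvMaskOf p t) / 2 = pvMaskOf p t := by
        by_cases h : p c <;> simp [h] <;> omega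
      rw [hdiv, ih]
      simp [List.getD_cons_succ]

lemma pv_and_eq (x m : Nat) :
    (x &&& m = m) ↔ ∀ k, m.testBit k = true → x.testBit k = true := by
  constructor
  · intro h k hk
    have := congrArg (fun n => n.testBit k) h
    simp only [Nat.testBit_and, hk, Bool.and_true] at this
    exact this
  · intro h
    apply Nat.eq_of_testBit_eq
    intro k
    rw [Nat.testBit_and]
    by_cases hk : m.testBit k = true
    · simp [hk, h k hk]
    · simp [Bool.eq_false_iff.mpr hk]

lemma pv_mem_zipIdx {α : Type} (l : List α) (a : α) (i : Nat) (d : α) :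
    ((a, i) ∈ l.zipIdx) ↔ (i < l.length ∧ l.getD i d = a) := by
  rw [List.mk_mem_zipIdx_iff_getElem?, List.getD_eq_getElem?_getD]
  constructor
  · intro h
    have h' := List.getElem?_eq_some_iff.mp h
    refine ⟨h'.1, ?_⟩
    rw [h]
    rfl
  · rintro ⟨h1, h2⟩
    rw [List.getElem?_eq_getElem h1] at h2 ⊢
    exact congrArg some (by simpa using h2)

lemma pv_zipIdx_map {α β : Type} (f : α → β) (l : List α) (n : Nat) :
    (l.map f).zipIdx n = (l.zipIdx n).map (fun q => (f q.1, q.2)) := by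
  induction l generalizing n with
  | nil => rfl
  | cons a t ih => simp [List.zipIdx_cons, ih]

-- one monster-row mask test equals the per-'#'-cell test, when all tested cells are in range
lemma pv_bchk_row (row mrow : List Char) (j : Nat)
    (hin : ∀ mj < mrow.length, mrow.getD mj ' ' = '#' → j + mj < row.length) :
    (((pvMaskOf (fun c => c != '.') row) >>> j) &&& pvMaskOf (fun c => c == '#') mrow
        == pvMaskOf (fun c => c == '#') mrow)
      = mrow.zipIdx.all (fun q => !(q.1 == '#') || decide (¬ row.getD (j + q.2) ' ' = '.')) := by
  rw [Bool.eq_iff_iff, beq_iff_eq, pv_and_eq, List.all_eq_true]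
  constructor
  · intro h q hq
    by_cases hc : q.1 = '#'
    · have hmem := (pv_mem_zipIdx mrow q.1 q.2 ' ').mp (by cases q; exact hq)
      have hbit : (pvMaskOf (fun c => c == '#') mrow).testBit q.2 = true := by
        rw [pv_mask_testBit]
        simp only [hmem.1, decide_true, Bool.true_and, hmem.2, hc, beq_self_eq_true]
      have := h q.2 hbit
      rw [Nat.testBit_shiftRight, pv_mask_testBit] at this
      simp only [Bool.and_eq_true, decide_eq_true_eq, bne_iff_ne] at this
      rw [Bool.or_eq_true]
      exact Or.inr (decide_eq_true this.2)
    · simp [hc]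
  · intro h k hk
    rw [pv_mask_testBit] at hk
    simp only [Bool.and_eq_true, decide_eq_true_eq, beq_iff_eq] at hk
    have hq : (mrow.getD k ' ', k) ∈ mrow.zipIdx :=
      (pv_mem_zipIdx mrow _ k ' ').mpr ⟨hk.1, rfl⟩
    have := h _ hq
    simp only [hk.2, beq_self_eq_true, Bool.not_true, Bool.false_or, decide_eq_true_eq] at this
    rw [Nat.testBit_shiftRight, pv_mask_testBit]
    simp only [Bool.and_eq_true, decide_eq_true_eq, bne_iff_ne]
    exact ⟨hin k hk.1 hk.2, this⟩

-- B's check equals the char-level check, when Pre_ guarantees the scanned cells are in range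
lemma pv_bchk_eq (r : List String) (i j : Nat)
    (hin : ∀ q ∈ pvOffsets, j + q.2 < (r.getD (i + q.1) "").toList.length) :
    pvBChk (pvRM r) i j = pvChk r i j := by
  have hrm : ∀ a, (pvRM r).getD a 0 = pvMaskOf (fun c => c != '.') ((r.getD a "").toList) := by
    intro a
    unfold pvRM
    rw [show (0:Nat) = pvMaskOf (fun c => c != '.') ("" : String).toList from rfl, List.getD_map]
  unfold pvBChk pvChk pvOffsets pvMM
  rw [List.all_flatMap, pv_zipIdx_map, List.all_map]
  apply pv_all_congr
  intro p hp
  simp only [Function.comp_def]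
  rw [List.all_filterMap]
  have hin' : ∀ mj < p.1.toList.length, p.1.toList.getD mj ' ' = '#' →
      j + mj < ((r.getD (i + p.2) "").toList.length) := by
    intro mj hmj hc
    apply hin (p.2, mj)
    unfold pvOffsets
    apply List.mem_flatMap.mpr
    exact ⟨p, hp, List.mem_filterMap.mpr ⟨(p.1.toList.getD mj ' ', mj),
      (pv_mem_zipIdx _ _ _ ' ').mpr ⟨hmj, rfl⟩, by simp only [hc]; simp⟩⟩
  rw [hrm, pv_bchk_row _ _ j hin']
  apply pv_all_congr
  intro q _
  by_cases hc : q.1 = '#' <;> simp [hc, pvCell]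

-- bit semantics of the per-row masks
def pvBit (om : List Nat) (a x : Nat) : Bool := (om.getD a 0).testBit x

lemma pv_bwrite_fold_len (i j : Nat) (ms : List (Nat × Nat)) (om : List Nat) :
    (ms.foldl (fun om q => om.set (i + q.2) ((om.getD (i + q.2) 0) ||| (q.1 <<< j))) om).length
      = om.length := by
  induction ms generalizing om with
  | nil => rfl
  | cons q t ih => rw [List.foldl_cons, ih, List.length_set]

lemma pv_bwrite_len (om : List Nat) (i j : Nat) : (pvBWrite om i j).length = om.length :=
  pv_bwrite_fold_len i j pvMM.zipIdx om

lemma pv_bit_write_fold (i j : Nat) (ms : List (Nat × Nat)) (om : List Nat)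
    (h : ∀ q ∈ ms, i + q.2 < om.length) (b x : Nat) :
    pvBit (ms.foldl (fun om q => om.set (i + q.2) ((om.getD (i + q.2) 0) ||| (q.1 <<< j))) om) b x
      = (pvBit om b x ||
          ms.any (fun q => decide (b = i + q.2) && decide (j ≤ x) && q.1.testBit (x - j))) := by
  induction ms generalizing om with
  | nil => simp
  | cons q t ih =>
    rw [List.foldl_cons]
    have hlen : (om.set (i + q.2) ((om.getD (i + q.2) 0) ||| (q.1 <<< j))).length = om.length := by
      simp
    have hq : i + q.2 < om.length := h q List.mem_cons_self
    rw [ih _ (by intro q' hq'; rw [hlen]; exact h q' (List.mem_cons_of_mem _ hq'))]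
    have hstep : pvBit (om.set (i + q.2) ((om.getD (i + q.2) 0) ||| (q.1 <<< j))) b x
        = (pvBit om b x || (decide (b = i + q.2) && decide (j ≤ x) && q.1.testBit (x - j))) := by
      unfold pvBit
      rw [pv_getD_set]
      by_cases hb : i + q.2 = b
      · rw [if_pos ⟨hb, hq⟩, Nat.testBit_or, Nat.testBit_shiftLeft]
        subst hb
        simp [ge_iff_le, Bool.and_assoc]
      · rw [if_neg (by tauto)]
        have hd : decide (b = i + q.2) = false := decide_eq_false (fun h' => hb h'.symm)
        simp [hd]
    rw [hstep, List.any_cons]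
    cases pvBit om b x <;> simp [Bool.or_assoc]

-- membership in the shifted '#' cells, as a bitmask test
lemma pv_mem_shift (i j b x : Nat) :
    decide ((b, x) ∈ pvShift i j)
      = pvMM.zipIdx.any (fun q => decide (b = i + q.2) && decide (j ≤ x) && q.1.testBit (x - j)) := by
  rw [Bool.eq_iff_iff, decide_eq_true_iff, List.any_eq_true]
  unfold pvShift pvOffsets pvMM
  rw [pv_zipIdx_map]
  constructor
  · intro h
    rcases List.mem_map.mp h with ⟨q, hq, he⟩
    rcases List.mem_flatMap.mp hq with ⟨p, hp, hq2⟩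
    rcases List.mem_filterMap.mp hq2 with ⟨c, hc, he2⟩
    by_cases h1 : c.1 = '#'
    · rw [if_pos h1] at he2
      have he2' : q = (p.2, c.2) := by injection he2 with h'; exact h'.symm
      subst he2'
      simp only [Prod.mk.injEq] at he
      refine ⟨(pvMaskOf (fun c => c == '#') p.1.toList, p.2),
        List.mem_map.mpr ⟨p, hp, rfl⟩, ?_⟩
      have hmem := (pv_mem_zipIdx p.1.toList c.1 c.2 ' ').mp (by cases c; exact hc)
      rw [pv_mask_testBit]
      have hxj : j ≤ x ∧ x - j = c.2 := by constructor <;> omega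
      simp only [pv_mask_testBit, Bool.and_eq_true, decide_eq_true_eq, beq_iff_eq]
      refine ⟨⟨he.1.symm, hxj.1⟩, ?_, ?_⟩
      · rw [hxj.2]; exact hmem.1
      · rw [hxj.2, hmem.2]; exact h1
    · rw [if_neg h1] at he2; exact absurd he2 (by simp)
  · rintro ⟨q, hq, hcond⟩
    rcases List.mem_map.mp hq with ⟨p, hp, rfl⟩
    simp only [Bool.and_eq_true, decide_eq_true_eq] at hcond
    obtain ⟨⟨hb, hjx⟩, hbit⟩ := hcond
    rw [pv_mask_testBit] at hbit
    simp only [Bool.and_eq_true, decide_eq_true_eq, beq_iff_eq] at hbit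
    apply List.mem_map.mpr
    refine ⟨(p.2, x - j), List.mem_flatMap.mpr ⟨p, hp, List.mem_filterMap.mpr
      ⟨(p.1.toList.getD (x - j) ' ', x - j), (pv_mem_zipIdx _ _ _ ' ').mpr ⟨hbit.1, rfl⟩,
        by simp only [hbit.2]; simp⟩⟩, ?_⟩
    simp [hb]
    omega

-- bits of the final omask = membership in A's write sequence
lemma pv_om_bits (r : List String) (ms : List (Nat × Nat))
    (h : ∀ ij ∈ ms, ij.1 + pvMonster.length ≤ r.length) (a x : Nat) :
    pvBit (ms.foldl (fun om ij => pvBWrite om ij.1 ij.2) (List.replicate r.length 0)) a x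
      = decide ((a, x) ∈ ms.flatMap (fun ij => pvShift ij.1 ij.2)) := by
  have hgen : ∀ (om : List Nat), om.length = r.length →
      pvBit (ms.foldl (fun om ij => pvBWrite om ij.1 ij.2) om) a x
        = (pvBit om a x || decide ((a, x) ∈ ms.flatMap (fun ij => pvShift ij.1 ij.2))) := by
    induction ms with
    | nil => intro om _; simp
    | cons ij t ih =>
      intro om hlen
      rw [List.foldl_cons]
      have hm : ∀ q ∈ pvMM.zipIdx, ij.1 + q.2 < om.length := by
        intro q hq
        have := List.mem_zipIdx hq
        have h3 : pvMM.length = pvMonster.length := by simp [pvMM]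
        have := h ij List.mem_cons_self
        omega
      have hstep := pv_bit_write_fold ij.1 ij.2 pvMM.zipIdx om hm a x
      have hlen2 : (pvBWrite om ij.1 ij.2).length = r.length := by rw [pv_bwrite_len, hlen]
      rw [ih (fun q hq => h q (List.mem_cons_of_mem _ hq)) _ hlen2]
      show (pvBit (pvBWrite om ij.1 ij.2) a x || _) = _
      unfold pvBWrite at hstep ⊢
      rw [hstep, ← pv_mem_shift, List.flatMap_cons]
      rw [Bool.eq_iff_iff]
      simp only [Bool.or_eq_true, decide_eq_true_eq, List.mem_append]
      tauto
  rw [hgen _ (by simp)]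
  have : pvBit (List.replicate r.length 0) a x = false := by
    unfold pvBit
    have : (List.replicate r.length (0:Nat)).getD a 0 = 0 := by
      rcases lt_or_ge a r.length with h' | h'
      · simp [List.getD, List.getElem?_replicate, h']
      · simp [List.getD, List.getElem?_eq_none (by simpa using h')]
    simp [this]
  rw [this, Bool.false_or]

-- rows after the batched string writes, as mapIdx
lemma pv_set_eq_mapIdx {α : Type} (l : List α) (k : Nat) (v : α) :
    l.set k v = l.mapIdx (fun x c => if x = k then v else c) := by
  apply List.ext_getElem
  · simp
  · intro n h1 h2
    rw [List.getElem_set, List.getElem_mapIdx]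
    by_cases h : k = n
    · simp [h]
    · rw [if_neg h, if_neg (fun h' => h h'.symm)]

lemma pv_mapIdx_mapIdx {α : Type} (l : List α) (f g : Nat → α → α) :
    (l.mapIdx g).mapIdx f = l.mapIdx (fun x c => f x (g x c)) := by
  apply List.ext_getElem
  · simp
  · intro n h1 h2
    simp [List.getElem_mapIdx]

lemma pv_rows (ps : List (Nat × Nat)) (s : List String) (a : Nat) :
    ((ps.foldl pvWS s).getD a "").toList
      = (s.getD a "").toList.mapIdx (fun x c => if (a, x) ∈ ps then 'O' else c) := by
  induction ps generalizing s with
  | nil =>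
    apply List.ext_getElem
    · simp
    · intro n h1 h2; simp [List.getElem_mapIdx]
  | cons p ps ih =>
    rw [List.foldl_cons, ih]
    have hrow : ((pvWS s p).getD a "").toList
        = (s.getD a "").toList.mapIdx (fun x c => if (a, x) = p then 'O' else c) := by
      unfold pvWS
      rw [pv_getD_set]
      by_cases hb : p.1 = a ∧ p.1 < s.length
      · rw [if_pos hb, String.toList_ofList, ← hb.1, pv_set_eq_mapIdx]
        apply List.ext_getElem
        · simp
        · intro n h1 h2
          simp only [List.getElem_mapIdx]
          by_cases h : n = p.2
          · simp [h, Prod.ext_iff]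
          · simp [h, Prod.ext_iff, fun hh : (p.1, n) = p => h (congrArg Prod.snd hh)]
      · rw [if_neg hb]
        by_cases hpa : p.1 = a
        · have hlen : ¬ a < s.length := fun hh => hb ⟨hpa, hpa ▸ hh⟩
          have he : s.getD a "" = "" := by
            simp [List.getD, List.getElem?_eq_none (by simpa using hlen)]
          rw [he]
          simp
        · apply List.ext_getElem
          · simp
          · intro n hn1 hn2
            simp only [List.getElem_mapIdx]
            have : (a, n) ≠ p := fun hh => hpa (congrArg Prod.fst hh).symm
            simp [this]
    rw [hrow, pv_mapIdx_mapIdx]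
    apply List.ext_getElem
    · simp
    · intro n h1 h2
      simp only [List.getElem_mapIdx, List.mem_cons]
      by_cases hm : (a, n) ∈ ps
      · simp [hm]
      · by_cases hp : (a, n) = p <;> simp [hm, hp]

-- (n >>> x) &&& 1 == 1 is testBit
lemma pv_and1 (n x : Nat) : ((n >>> x) &&& 1 == 1) = n.testBit x := by
  rw [Nat.and_one_is_mod, Nat.testBit_eq_decide_div_mod_eq, Nat.shiftRight_eq_div_pow]
  rcases Nat.mod_two_eq_zero_or_one (n / 2 ^ x) with h | h <;> simp [h]

-- marks lie below r.length + monster height bound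
lemma pv_marks_rows (r : List String) (ij : Nat × Nat)
    (h : ij ∈ (List.range (r.length - pvMonster.length)).flatMap (fun i =>
      (List.range ((r.getD 0 "").toList.length - (pvMonster.getD 0 "").toList.length)).filterMap
        (fun j => if pvChk r i j then some (i, j) else none))) :
    ij.1 + pvMonster.length ≤ r.length := by
  rcases List.mem_flatMap.mp h with ⟨i, hi, hj⟩
  rcases List.mem_filterMap.mp hj with ⟨j, _, he⟩
  have hi' := List.mem_range.mp hi
  by_cases hc : pvChk r i j = true
  · rw [if_pos hc] at he
    injection he with he
    rw [← he]
    simp only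
    omega
  · rw [if_neg (by simpa using hc)] at he; exact absurd he (by simp)

lemma pv_flatMap_congr {α β : Type} (l : List α) (f g : α → List β)
    (h : ∀ x ∈ l, f x = g x) : l.flatMap f = l.flatMap g := by
  induction l with
  | nil => rfl
  | cons a t ih => simp_all

lemma pv_foldl_ws_len (ps : List (Nat × Nat)) (s : List String) :
    (ps.foldl pvWS s).length = s.length := by
  induction ps generalizing s with
  | nil => rfl
  | cons p t ih => rw [List.foldl_cons, ih, pv_len_WS]

lemma pv_main (r : List String) (hpre : Pre_fill_monster r) :
    fill_monster r = fill_monster_alt r := by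
  rw [pv_A_marks]
  by_cases hg : pvMonster.length < r.length ∧ (pvMonster.getD 0 "").toList.length < (r.getD 0 "").toList.length
  case neg =>
    -- no anchor fits: A performs no write, B returns r unchanged
    have hnil : pvMarks r (List.range (r.length - pvMonster.length)) = [] := by
      unfold pvMarks
      rcases not_and_or.mp hg with h | h
      · rw [show r.length - pvMonster.length = 0 by omega]
        rfl
      · have h0 : (r.getD 0 "").toList.length - (pvMonster.getD 0 "").toList.length = 0 := by
          omega
        rw [h0]
        simp
    rw [hnil]
    unfold fill_monster_alt
    rw [if_neg hg]
    rfl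
  case pos =>
  have hB : fill_monster_alt r =
      r.zipIdx.map (fun p => String.ofList (p.1.toList.zipIdx.map (fun q =>
        if ((((List.range (r.length - pvMonster.length)).foldl (fun om i =>
              (List.range ((r.getD 0 "").toList.length - (pvMonster.getD 0 "").toList.length)).foldl
                (fun om j => if pvBChk (pvRM r) i j then pvBWrite om i j else om) om)
            (List.replicate r.length 0)).getD p.2 0) >>> q.2) &&& 1 == 1 then 'O' else q.1))) := by
    unfold fill_monster_alt
    rw [if_pos hg]
  rw [hB]
  set is := List.range (r.length - pvMonster.length) with his
  set W := (r.getD 0 "").toList.length - (pvMonster.getD 0 "").toList.length with hW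
  set mA := is.flatMap (fun i => (List.range W).filterMap
      (fun j => if pvChk r i j then some (i, j) else none)) with hmA
  -- the two match tests agree inside the scanned ranges
  have hchk : ∀ i ∈ is, ∀ j ∈ List.range W, pvBChk (pvRM r) i j = pvChk r i j := by
    intro i hi j hj
    apply pv_bchk_eq
    intro q hq
    refine hpre i (by simpa [his] using hi) j ?_ q hq
    have := List.mem_range.mp hj
    have h20 : (pvMonster.getD 0 "").toList.length = 20 := by decide
    omega
  -- A's write sequence, regrouped per match
  have hmarks : pvMarks r is = mA.flatMap (fun ij => pvShift ij.1 ij.2) := by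
    rw [hmA, List.flatMap_assoc]
    unfold pvMarks
    refine pv_flatMap_congr _ _ _ (fun i _ => ?_)
    rw [pv_filterMap_if_flatMap (fun j => pvChk r i j = true) (fun j => (i, j))
      (fun ij : Nat × Nat => pvShift ij.1 ij.2)]
  -- B's omask fold, flattened to a fold over the matches
  have hom : (is.foldl (fun om i => (List.range W).foldl
        (fun om j => if pvBChk (pvRM r) i j then pvBWrite om i j else om) om)
      (List.replicate r.length 0))
      = mA.foldl (fun om ij => pvBWrite om ij.1 ij.2) (List.replicate r.length 0) := by
    rw [hmA, pv_foldl_flatMap]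
    refine PySem.List.foldl_congr_mem _ _ _ _ (fun om i hi => ?_)
    rw [← pv_foldl_if_filterMap (fun j => pvChk r i j = true) (fun j => (i, j))
      (fun om ij : _ => pvBWrite om ij.1 ij.2)]
    refine PySem.List.foldl_congr_mem _ _ _ _ (fun om' j hj => ?_)
    rw [hchk i hi j hj]
  rw [hom]
  -- bits of the final omask = membership in A's write sequence
  have hbits : ∀ a x,
      pvBit (mA.foldl (fun om ij => pvBWrite om ij.1 ij.2) (List.replicate r.length 0)) a x
        = decide ((a, x) ∈ pvMarks r is) := by
    intro a x
    rw [pv_om_bits r mA (fun ij hij => pv_marks_rows r ij hij) a x, hmarks]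
  unfold pvBit at hbits
  -- row-by-row comparison
  apply List.ext_getElem
  · rw [pv_foldl_ws_len]
    simp
  · intro a h1 h2
    have har : a < r.length := by rw [pv_foldl_ws_len] at h1; exact h1
    -- the B-side row
    rw [List.getElem_map, List.getElem_zipIdx]
    -- the A-side row, via its character list
    have hrow : ((pvMarks r is).foldl pvWS r)[a].toList
        = (r.getD a "").toList.mapIdx (fun x c => if (a, x) ∈ pvMarks r is then 'O' else c) := by
      rw [← List.getD_eq_getElem _ "" h1, pv_rows]
    have : ((pvMarks r is).foldl pvWS r)[a]
        = String.ofList ((r.getD a "").toList.mapIdx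
            (fun x c => if (a, x) ∈ pvMarks r is then 'O' else c)) := by
      rw [← hrow, String.ofList_toList]
    rw [this]
    congr 1
    rw [List.mapIdx_eq_zipIdx_map, Nat.zero_add, List.getD_eq_getElem _ "" har]
    refine List.map_congr_left (fun q hq => ?_)
    simp only [pv_and1]
    rw [hbits a q.2]
    by_cases hm : (a, q.2) ∈ pvMarks r is <;> simp [hm]

-- ===== VERDICT (by name: the statement is the Claim_ definition above) =====
theorem fill_monster_spec : Claim_equal_fill_monster := by
  intro r _ hpre
  unfold Spec_fill_monster
  exact pv_main r hpre
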